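-- pv_equiv track=rewrite | github.com/mll-lab-nu/RAGEN | ragen/env/lean/env.py | _split_formal_sections
-- ===== SOURCE A (Python) =====
-- from typing import Any, Dict, List, Optional, Sequence, Tuple
--
-- def _split_formal_sections(text: str) -> tuple[str, str, str]:
--     """Return (imports, preamble, body) sections from a Lean snippet."""
--
--     imports: List[str] = []
--     preamble: List[str] = []
--     body: List[str] = []
--
--     body_started = False
--     for line in text.splitlines():
--         stripped = line.strip()
--         if not stripped:
--             if body_started:
--                 body.append(line)
--             else:
--                 preamble.append(line)
--             continue
--
--         if stripped.startswith("import") and not body_started: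
--             imports.append(line)
--             continue
--
--         if not body_started and any(
--             stripped.startswith(keyword)
--             for keyword in ("theorem", "lemma", "def", "example", "instance")
--         ):
--             body_started = True
--             body.append(line)
--             continue
--
--         if body_started:
--             body.append(line)
--         else:
--             preamble.append(line)
--
--     imports_text = "\n".join(imports).strip()
--     preamble_text = "\n".join(preamble).strip()
--     body_text = "\n".join(body).strip()
--     return imports_text, preamble_text, body_text
-- ===== SOURCE B (Python) =====
-- def _split_formal_sections(text: str) -> tuple[str, str, str]:
--     """Return (imports, preamble, body) sections from a Lean snippet."""
--     lines = text.splitlines()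
--     keywords = ("theorem", "lemma", "def", "example", "instance")
--     body_index = next(
--         (i for i, line in enumerate(lines)
--          if line.strip() and line.strip().startswith(keywords)),
--         len(lines),
--     )
--     head = lines[:body_index]
--     imports = [l for l in head if l.strip().startswith("import")]
--     preamble = [l for l in head if not l.strip().startswith("import")]
--     return (
--         "\n".join(imports).strip(),
--         "\n".join(preamble).strip(),
--         "\n".join(lines[body_index:]).strip(),
--     )
-- ===== Notes on version B (the rewrite author's own statement) =====
-- stated objective: simpler
-- what changed: Replaced A's single stateful flag-driven accumulation pass by a boundary search for the first body-start line followed by slicing and partitioning the prefix with comprehensions.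
import Mathlib
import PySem

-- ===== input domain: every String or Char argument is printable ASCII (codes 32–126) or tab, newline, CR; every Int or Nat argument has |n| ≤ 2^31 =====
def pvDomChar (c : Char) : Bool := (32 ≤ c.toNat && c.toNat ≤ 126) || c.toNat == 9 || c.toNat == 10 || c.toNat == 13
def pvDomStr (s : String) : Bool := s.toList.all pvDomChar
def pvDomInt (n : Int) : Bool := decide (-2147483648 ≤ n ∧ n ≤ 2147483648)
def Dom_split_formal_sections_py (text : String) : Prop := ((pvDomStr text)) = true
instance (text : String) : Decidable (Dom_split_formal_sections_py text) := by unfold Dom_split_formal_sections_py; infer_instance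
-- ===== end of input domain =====

-- B replaces A's single flag-driven accumulator pass by boundary detection (first body-start line) followed by slice-and-partition of the prefix; objective: simpler.

-- ===== PORT A =====
-- A's `any(stripped.startswith(k) for k in (...))`
def pvKwAnyA (s : String) : Bool :=
  (["theorem", "lemma", "def", "example", "instance"]).any (fun k => PySem.Str.startswith s k)

-- the `for line in text.splitlines()` loop, state (imports, preamble, body, body_started)
def pvLoopA : List String → List String → List String → List String → Bool →
    List String × List String × List String
  | [], imps, pre, body, _ => (imps, pre, body)
  | l :: ls, imps, pre, body, started =>
    let s := PySem.Str.strip l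
    if s = "" then
      if started then pvLoopA ls imps pre (body ++ [l]) started
      else pvLoopA ls imps (pre ++ [l]) body started
    else if PySem.Str.startswith s "import" && !started then
      pvLoopA ls (imps ++ [l]) pre body started
    else if !started && pvKwAnyA s then
      pvLoopA ls imps pre (body ++ [l]) true
    else if started then pvLoopA ls imps pre (body ++ [l]) started
    else pvLoopA ls imps (pre ++ [l]) body started

def split_formal_sections_py (text : String) : String × String × String :=
  let r := pvLoopA (PySem.Str.splitlines text) [] [] [] false
  (PySem.Str.strip (PySem.Str.join "\n" r.1),
   PySem.Str.strip (PySem.Str.join "\n" r.2.1),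
   PySem.Str.strip (PySem.Str.join "\n" r.2.2))

-- ===== PORT B =====
-- Source B's body-start predicate: `line.strip() and line.strip().startswith(keywords)` (startswith with a tuple = any)
def pvIsBodyStartB (l : String) : Bool :=
  let s := PySem.Str.strip l
  !(s == "") && (["theorem", "lemma", "def", "example", "instance"]).any (fun k => PySem.Str.startswith s k)

-- Source B's import predicate on a line
def pvIsImportB (l : String) : Bool := PySem.Str.startswith (PySem.Str.strip l) "import"

def split_formal_sections_py_alt (text : String) : String × String × String :=
  let lines := PySem.Str.splitlines text
  -- `next((i for i, line in enumerate(lines) if ...), len(lines))` = List.findIdx (length when absent)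
  let bodyIndex := lines.findIdx pvIsBodyStartB
  -- `lines[:body_index]` with 0 ≤ bodyIndex ≤ len(lines): exactly List.take
  let head := lines.take bodyIndex
  let imports := head.filter pvIsImportB
  let preamble := head.filter (fun l => !pvIsImportB l)
  (PySem.Str.strip (PySem.Str.join "\n" imports),
   PySem.Str.strip (PySem.Str.join "\n" preamble),
   PySem.Str.strip (PySem.Str.join "\n" (lines.drop bodyIndex)))

-- ===== PRECONDITION & SPEC =====
def Spec_split_formal_sections_py (text : String) (out : String × String × String) : Prop := out = split_formal_sections_py_alt text
instance (text : String) (out : String × String × String) : Decidable (Spec_split_formal_sections_py text out) := by unfold Spec_split_formal_sections_py; infer_instance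

-- ===== CLAIM (what is proved, stated in full; the proofs are below) =====
def Claim_equal_split_formal_sections_py : Prop := ∀ (text : String), Dom_split_formal_sections_py text → Spec_split_formal_sections_py text (split_formal_sections_py text)

-- ===== LEMMAS AND PROOFS =====

-- once body_started is true every remaining line goes to body
lemma pvLoopA_true (ls : List String) : ∀ imps pre body,
    pvLoopA ls imps pre body true = (imps, pre, body ++ ls) := by
  induction ls with
  | nil => intro imps pre body; simp [pvLoopA]
  | cons l ls ih =>
    intro imps pre body
    simp only [pvLoopA]
    split_ifs <;> simp_all

-- a line starting with "import" starts with none of the body keywords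
lemma pv_import_not_kw (s : String) (h : PySem.Str.startswith s "import" = true) :
    pvKwAnyA s = false := by
  rw [PySem.Str.startswith_eq, PySem.Chars.startswith_iff] at h
  obtain ⟨t, ht⟩ := h
  unfold pvKwAnyA
  simp only [PySem.Str.startswith_eq, PySem.Chars.startswith]
  have hs : s.toList = 'i' :: 'm' :: 'p' :: 'o' :: 'r' :: 't' :: t := by
    rw [← ht]; rfl
  simp [hs, List.isPrefixOf]

-- the flag-driven pass from flag = false equals boundary detection + partition of the prefix
lemma pvLoopA_false (ls : List String) : ∀ imps pre body,
    pvLoopA ls imps pre body false =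
      (imps ++ (ls.take (ls.findIdx pvIsBodyStartB)).filter pvIsImportB,
       pre ++ (ls.take (ls.findIdx pvIsBodyStartB)).filter (fun l => !pvIsImportB l),
       body ++ ls.drop (ls.findIdx pvIsBodyStartB)) := by
  induction ls with
  | nil => intro imps pre body; simp [pvLoopA]
  | cons l ls ih =>
    intro imps pre body
    have e : pvIsBodyStartB l =
        ((!(PySem.Str.strip l == "")) && pvKwAnyA (PySem.Str.strip l)) := rfl
    by_cases hs : PySem.Str.strip l = ""
    · have hb : pvIsBodyStartB l = false := by rw [e, hs]; decide
      have hi : pvIsImportB l = false := by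
        simp only [pvIsImportB, hs]; decide
      simp only [pvLoopA]
      rw [if_pos hs, if_neg (by simp : ¬ (false = true)), ih]
      simp only [List.findIdx_cons, hb, cond_false, List.take_succ_cons, List.drop_succ_cons,
        List.filter_cons, hi, Bool.not_false, if_true, Bool.false_eq_true, if_false]
      simp [List.append_assoc]
    · by_cases himp : PySem.Str.startswith (PySem.Str.strip l) "import" = true
      · have hkw := pv_import_not_kw _ himp
        have hb : pvIsBodyStartB l = false := by rw [e, hkw, Bool.and_false]
        have hi : pvIsImportB l = true := himp
        simp only [pvLoopA]
        rw [if_neg hs, if_pos (by rw [himp]; rfl), ih]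
        simp only [List.findIdx_cons, hb, cond_false, List.take_succ_cons, List.drop_succ_cons,
          List.filter_cons, hi, Bool.not_true]
        simp [List.append_assoc]
      · have hne : (PySem.Str.strip l == "") = false := beq_eq_false_iff_ne.mpr hs
        have himp' : PySem.Str.startswith (PySem.Str.strip l) "import" = false :=
          Bool.eq_false_iff.mpr himp
        by_cases hkw : pvKwAnyA (PySem.Str.strip l) = true
        · have hb : pvIsBodyStartB l = true := by rw [e, hne, hkw]; rfl
          simp only [pvLoopA]
          rw [if_neg hs,
            if_neg (by rw [Bool.not_false, Bool.and_true, himp']; simp),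
            if_pos (by rw [hkw]; rfl), pvLoopA_true]
          simp [List.findIdx_cons, hb]
        · have hkw' : pvKwAnyA (PySem.Str.strip l) = false := Bool.eq_false_iff.mpr hkw
          have hb : pvIsBodyStartB l = false := by rw [e, hkw', Bool.and_false]
          have hi : pvIsImportB l = false := himp'
          simp only [pvLoopA]
          rw [if_neg hs,
            if_neg (by rw [Bool.not_false, Bool.and_true, himp']; simp),
            if_neg (by rw [Bool.not_false, Bool.true_and, hkw']; simp),
            if_neg (by simp : ¬ (false = true)), ih]
          simp only [List.findIdx_cons, hb, cond_false, List.take_succ_cons, List.drop_succ_cons,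
            List.filter_cons, hi, Bool.not_false]
          simp [List.append_assoc]

-- ===== VERDICT (by name: the statement is the Claim_ definition above) =====
theorem split_formal_sections_py_spec : Claim_equal_split_formal_sections_py := by
  intro text _
  unfold Spec_split_formal_sections_py split_formal_sections_py split_formal_sections_py_alt
  rw [pvLoopA_false]
  simp
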